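-- pv_equiv track=rewrite | github.com/sxl1993/CodeForLLm | test/pp_tp_example/train.py | get_tp_pp_ranks
-- ===== SOURCE A (Python) =====
-- def get_tp_pp_ranks(world_size, tp_size, pp_size):
--     # TP groups
--     tp_groups = []
--     for i in range(world_size // tp_size):
--         tp_groups.append(list(range(i * tp_size, (i + 1) * tp_size)))
--
--     # PP groups
--     pp_groups = []
--     for i in range(world_size // pp_size):
--         pp_groups.append(list(range(i, world_size, world_size // pp_size)))
--
--     return tp_groups, pp_groups
-- ===== SOURCE B (Python) =====
-- def get_tp_pp_ranks(world_size, tp_size, pp_size):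
--     # Scatter decomposition: instead of generating each group with range(),
--     # allocate the buckets once and walk the ranks in one pass, dropping each
--     # rank into its bucket (rank // tp_size for TP, rank % num_pp for PP).
--     num_tp = world_size // tp_size
--     tp_groups = [[] for _ in range(num_tp)]
--     if num_tp > 0:
--         for rank in range(num_tp * tp_size):
--             tp_groups[rank // tp_size].append(rank)
--
--     num_pp = world_size // pp_size
--     pp_groups = [[] for _ in range(num_pp)]
--     if num_pp > 0:
--         for rank in range(world_size):
--             pp_groups[rank % num_pp].append(rank)
--
--     return tp_groups, pp_groups
-- ===== Notes on version B (the rewrite author's own statement) =====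
-- stated objective: alternative
-- what changed: Instead of generating each group with range(), B allocates the buckets once and makes one scatter pass over the ranks, dropping each rank into its bucket (rank//tp_size for TP, rank%num_pp for PP).
import Mathlib
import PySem

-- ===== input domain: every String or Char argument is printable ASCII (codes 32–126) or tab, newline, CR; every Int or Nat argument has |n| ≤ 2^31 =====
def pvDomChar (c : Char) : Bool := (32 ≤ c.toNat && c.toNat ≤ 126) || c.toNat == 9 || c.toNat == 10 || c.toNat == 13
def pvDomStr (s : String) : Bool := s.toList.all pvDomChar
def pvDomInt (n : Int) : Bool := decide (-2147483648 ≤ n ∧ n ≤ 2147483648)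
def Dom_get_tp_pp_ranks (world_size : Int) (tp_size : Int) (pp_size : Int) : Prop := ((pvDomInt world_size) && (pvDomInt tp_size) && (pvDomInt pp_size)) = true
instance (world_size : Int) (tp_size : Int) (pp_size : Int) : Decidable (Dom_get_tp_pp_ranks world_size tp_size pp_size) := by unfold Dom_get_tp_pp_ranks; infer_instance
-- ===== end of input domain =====

-- B replaces A's per-group range() generation by a single scatter pass over the ranks
-- into preallocated buckets (alternative decomposition; return value proved equal).

-- ===== PORT A =====
def get_tp_pp_ranks (world_size : Int) (tp_size : Int) (pp_size : Int) : List (List Int) × List (List Int) :=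
  let tp_groups : List (List Int) :=
    (PySem.List.pyRange 0 (PySem.Int.floordiv world_size tp_size) 1).foldl
      (fun acc i => acc ++ [PySem.List.pyRange (i * tp_size) ((i + 1) * tp_size) 1]) []
  let pp_groups : List (List Int) :=
    (PySem.List.pyRange 0 (PySem.Int.floordiv world_size pp_size) 1).foldl
      (fun acc i => acc ++ [PySem.List.pyRange i world_size (PySem.Int.floordiv world_size pp_size)]) []
  (tp_groups, pp_groups)

-- ===== PORT B =====
-- `tp_groups[idx].append(rank)` is ported as List.modify at index idx.toNat: inside the
-- `num_* > 0` guards every computed index is nonnegative and in range, so .toNat is exact.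
def get_tp_pp_ranks_alt (world_size : Int) (tp_size : Int) (pp_size : Int) : List (List Int) × List (List Int) :=
  let num_tp := PySem.Int.floordiv world_size tp_size
  let tp0 : List (List Int) := (PySem.List.pyRange 0 num_tp 1).map (fun _ => [])
  let tp_groups :=
    if num_tp > 0 then
      (PySem.List.pyRange 0 (num_tp * tp_size) 1).foldl
        (fun g r => g.modify (PySem.Int.floordiv r tp_size).toNat (fun l => l ++ [r])) tp0
    else tp0
  let num_pp := PySem.Int.floordiv world_size pp_size
  let pp0 : List (List Int) := (PySem.List.pyRange 0 num_pp 1).map (fun _ => [])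
  let pp_groups :=
    if num_pp > 0 then
      (PySem.List.pyRange 0 world_size 1).foldl
        (fun g r => g.modify (PySem.Int.mod r num_pp).toNat (fun l => l ++ [r])) pp0
    else pp0
  (tp_groups, pp_groups)

-- ===== PRECONDITION & SPEC =====
-- Python A raises ZeroDivisionError when tp_size = 0 or pp_size = 0; Pre_ excludes exactly those.
def Pre_get_tp_pp_ranks (world_size : Int) (tp_size : Int) (pp_size : Int) : Prop :=
  tp_size ≠ 0 ∧ pp_size ≠ 0
instance (world_size : Int) (tp_size : Int) (pp_size : Int) : Decidable (Pre_get_tp_pp_ranks world_size tp_size pp_size) := by unfold Pre_get_tp_pp_ranks; infer_instance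

def pvWitness_get_tp_pp_ranks : Int × Int × Int := (8, 2, 4)

def Spec_get_tp_pp_ranks (world_size : Int) (tp_size : Int) (pp_size : Int) (out : List (List Int) × List (List Int)) : Prop := out = get_tp_pp_ranks_alt world_size tp_size pp_size
instance (world_size : Int) (tp_size : Int) (pp_size : Int) (out : List (List Int) × List (List Int)) : Decidable (Spec_get_tp_pp_ranks world_size tp_size pp_size out) := by unfold Spec_get_tp_pp_ranks; infer_instance

-- ===== CLAIM =====
def Claim_equal_get_tp_pp_ranks : Prop := ∀ (world_size : Int) (tp_size : Int) (pp_size : Int), Dom_get_tp_pp_ranks world_size tp_size pp_size → Pre_get_tp_pp_ranks world_size tp_size pp_size → Spec_get_tp_pp_ranks world_size tp_size pp_size (get_tp_pp_ranks world_size tp_size pp_size)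

-- ===== LEMMAS AND PROOFS =====

-- The scatter loop characterised: bucket j ends up with its initial content followed by
-- the ranks (in order) whose key equals j; out-of-range keys are dropped by modify, as by filter.
theorem pv_scatter_eq (f : Int → Nat) : ∀ (rs : List Int) (init : List (List Int)),
    rs.foldl (fun g r => g.modify (f r) (fun l => l ++ [r])) init
      = init.mapIdx (fun j l => l ++ rs.filter (fun r => f r == j)) := by
  intro rs
  induction rs with
  | nil =>
      intro init
      apply List.ext_getElem (by simp)
      intro j h1 h2
      simp [List.getElem_mapIdx]
  | cons r rs ih =>
      intro init
      simp only [List.foldl_cons]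
      rw [ih]
      apply List.ext_getElem (by simp)
      intro j h1 h2
      simp only [List.getElem_mapIdx, List.getElem_modify, List.filter_cons]
      by_cases h : f r = j
      · simp [h]
      · simp [h, beq_iff_eq]

-- TP filter block: among ranks 0..N-1 the ones with rank // tp = j are exactly block j.
theorem pv_tp_filter (tp N : Int) (j : Nat) (htp : 0 < tp) (hN : ((j : Int) + 1) * tp ≤ N) :
    (PySem.List.pyRange 0 N 1).filter (fun r => ((PySem.Int.floordiv r tp).toNat == j))
      = PySem.List.pyRange ((j : Int) * tp) (((j : Int) + 1) * tp) 1 := by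
  have h0 : (0 : Int) ≤ (j : Int) * tp := by positivity
  have h1 : (j : Int) * tp ≤ ((j : Int) + 1) * tp := by nlinarith
  rw [PySem.List.pyRange_one_append 0 ((j : Int) * tp) N h0 (le_trans h1 hN),
      PySem.List.pyRange_one_append ((j : Int) * tp) (((j : Int) + 1) * tp) N h1 hN,
      List.filter_append, List.filter_append]
  have e1 : (PySem.List.pyRange 0 ((j : Int) * tp) 1).filter
      (fun r => ((PySem.Int.floordiv r tp).toNat == j)) = [] := by
    rw [List.filter_eq_nil_iff]
    intro r hr
    rw [PySem.List.mem_pyRange_one] at hr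
    have hlt : PySem.Int.floordiv r tp < (j : Int) :=
      (PySem.Int.floordiv_lt_iff_lt_mul htp).mpr hr.2
    have hge : (0 : Int) ≤ PySem.Int.floordiv r tp :=
      (PySem.Int.le_floordiv_iff_mul_le htp).mpr (by simpa using hr.1)
    simp only [beq_iff_eq]
    omega
  have e2 : (PySem.List.pyRange ((j : Int) * tp) (((j : Int) + 1) * tp) 1).filter
      (fun r => ((PySem.Int.floordiv r tp).toNat == j))
      = PySem.List.pyRange ((j : Int) * tp) (((j : Int) + 1) * tp) 1 := by
    rw [List.filter_eq_self]
    intro r hr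
    rw [PySem.List.mem_pyRange_one] at hr
    have : PySem.Int.floordiv r tp = (j : Int) :=
      (PySem.Int.floordiv_eq_iff_of_pos htp).mpr ⟨hr.1, hr.2⟩
    simp [this]
  have e3 : (PySem.List.pyRange (((j : Int) + 1) * tp) N 1).filter
      (fun r => ((PySem.Int.floordiv r tp).toNat == j)) = [] := by
    rw [List.filter_eq_nil_iff]
    intro r hr
    rw [PySem.List.mem_pyRange_one] at hr
    have hge : (j : Int) + 1 ≤ PySem.Int.floordiv r tp :=
      (PySem.Int.le_floordiv_iff_mul_le htp).mpr hr.1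
    simp only [beq_iff_eq]
    omega
  rw [e1, e2, e3]
  simp

-- PP filter: among ranks 0..w-1 the ones with rank % s = j are exactly range(j, w, s).
theorem pv_pp_filter (s w : Int) (j : Nat) (hs : 0 < s) (hj : (j : Int) < s) :
    (PySem.List.pyRange 0 w 1).filter (fun r => ((PySem.Int.mod r s).toNat == j))
      = PySem.List.pyRange (j : Int) w s := by
  have hmem : ∀ x : Int,
      x ∈ (PySem.List.pyRange 0 w 1).filter (fun r => ((PySem.Int.mod r s).toNat == j))
        ↔ x ∈ PySem.List.pyRange (j : Int) w s := by
    intro x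
    rw [List.mem_filter, PySem.List.mem_pyRange_one, PySem.List.mem_pyRange_iff_of_pos hs]
    simp only [beq_iff_eq]
    constructor
    · rintro ⟨⟨hx0, hxw⟩, hmod⟩
      have hm0 : 0 ≤ PySem.Int.mod x s := PySem.Int.mod_nonneg x hs
      have hmj : PySem.Int.mod x s = (j : Int) := by omega
      rw [PySem.Int.mod_eq_emod_of_pos hs] at hmj
      have hjx : (j : Int) ≤ x := by
        by_contra hc
        rw [not_le] at hc
        have : x % s = x := Int.emod_eq_of_lt hx0 (by omega)
        omega
      refine ⟨hjx, hxw, ?_⟩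
      have : (x - (j : Int)) % s = 0 := by
        have hjj : (j : Int) % s = (j : Int) := Int.emod_eq_of_lt (by omega) hj
        rw [Int.sub_emod, hmj, hjj]
        simp
      exact Int.dvd_of_emod_eq_zero this
    · rintro ⟨hjx, hxw, hdvd⟩
      have hx0 : (0 : Int) ≤ x := le_trans (by omega) hjx
      refine ⟨⟨hx0, hxw⟩, ?_⟩
      have hmj : x % s = (j : Int) := by
        have hjj : (j : Int) % s = (j : Int) := Int.emod_eq_of_lt (by omega) hj
        have := Int.emod_emod_of_dvd x (dvd_refl s)
        have h2 : x % s = (j : Int) % s := Int.ModEq.symm (Int.modEq_iff_dvd.mpr (by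
          rcases hdvd with ⟨t, ht⟩
          exact ⟨t, by omega⟩))
        rw [h2, hjj]
      rw [PySem.Int.mod_eq_emod_of_pos hs, hmj]
      omega
  have hsortL : ((PySem.List.pyRange 0 w 1).filter
      (fun r => ((PySem.Int.mod r s).toNat == j))).Pairwise (· < ·) :=
    (PySem.List.pairwise_lt_pyRange_one 0 w).filter _
  have hsortR : (PySem.List.pyRange (j : Int) w s).Pairwise (· < ·) := by
    rw [PySem.List.pyRange_of_pos _ _ hs]
    refine List.Pairwise.map _ ?_ (List.pairwise_lt_range)
    intro a b hab
    have : s * (a : Int) < s * (b : Int) := by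
      apply mul_lt_mul_of_pos_left _ hs
      exact_mod_cast hab
    omega
  have hperm : ((PySem.List.pyRange 0 w 1).filter
      (fun r => ((PySem.Int.mod r s).toNat == j))).Perm (PySem.List.pyRange (j : Int) w s) := by
    rw [List.perm_ext_iff_of_nodup (hsortL.imp ne_of_lt) (hsortR.imp ne_of_lt)]
    exact hmem
  exact List.Perm.eq_of_pairwise (fun a b _ _ h1 h2 => le_antisymm h1 h2)
    (hsortL.imp le_of_lt) (hsortR.imp le_of_lt) hperm

-- tp-side agreement
theorem pv_tp_eq (world_size tp_size : Int) (h : tp_size ≠ 0) :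
    (PySem.List.pyRange 0 (PySem.Int.floordiv world_size tp_size) 1).foldl
      (fun acc i => acc ++ [PySem.List.pyRange (i * tp_size) ((i + 1) * tp_size) 1]) []
    = (if PySem.Int.floordiv world_size tp_size > 0 then
        (PySem.List.pyRange 0 (PySem.Int.floordiv world_size tp_size * tp_size) 1).foldl
          (fun g r => g.modify (PySem.Int.floordiv r tp_size).toNat (fun l => l ++ [r]))
          ((PySem.List.pyRange 0 (PySem.Int.floordiv world_size tp_size) 1).map (fun _ => []))
      else (PySem.List.pyRange 0 (PySem.Int.floordiv world_size tp_size) 1).map (fun _ => [])) := by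
  set n := PySem.Int.floordiv world_size tp_size with hn
  rw [PySem.List.foldl_append_singleton_eq_map, List.nil_append]
  by_cases hpos : n > 0
  · rw [if_pos hpos]
    rcases lt_or_gt_of_ne h with htp | htp
    · -- tp_size < 0: both sides are n empty groups
      have hneg : n * tp_size < 0 := mul_neg_of_pos_of_neg hpos htp
      rw [PySem.List.pyRange_one_eq_nil (by omega : n * tp_size ≤ 0)]
      simp only [List.foldl_nil]
      apply List.map_congr_left
      intro i hi
      rw [PySem.List.mem_pyRange_one] at hi
      exact PySem.List.pyRange_one_eq_nil (by nlinarith)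
    · -- tp_size > 0: scatter fills block j of the n buckets
      rw [pv_scatter_eq]
      apply List.ext_getElem (by simp)
      intro j hj1 hj2
      have hjn : (j : Int) < n := by
        have := hj1
        simp only [List.length_map, PySem.List.length_pyRange_one] at this
        omega
      simp only [List.getElem_mapIdx, List.getElem_map, PySem.List.getElem_pyRange_one]
      rw [List.nil_append, pv_tp_filter tp_size (n * tp_size) j htp
          (by nlinarith : ((j : Int) + 1) * tp_size ≤ n * tp_size)]
      norm_num
  · rw [if_neg hpos]
    rw [PySem.List.pyRange_one_eq_nil (by omega : n ≤ 0)]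
    simp

-- pp-side agreement
theorem pv_pp_eq (world_size pp_size : Int) :
    (PySem.List.pyRange 0 (PySem.Int.floordiv world_size pp_size) 1).foldl
      (fun acc i => acc ++ [PySem.List.pyRange i world_size (PySem.Int.floordiv world_size pp_size)]) []
    = (if PySem.Int.floordiv world_size pp_size > 0 then
        (PySem.List.pyRange 0 world_size 1).foldl
          (fun g r => g.modify (PySem.Int.mod r (PySem.Int.floordiv world_size pp_size)).toNat
            (fun l => l ++ [r]))
          ((PySem.List.pyRange 0 (PySem.Int.floordiv world_size pp_size) 1).map (fun _ => []))
      else (PySem.List.pyRange 0 (PySem.Int.floordiv world_size pp_size) 1).map (fun _ => [])) := by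
  set s := PySem.Int.floordiv world_size pp_size with hs
  rw [PySem.List.foldl_append_singleton_eq_map, List.nil_append]
  by_cases hpos : s > 0
  · rw [if_pos hpos, pv_scatter_eq]
    apply List.ext_getElem (by simp)
    intro j hj1 hj2
    have hjs : (j : Int) < s := by
      have := hj1
      simp only [List.length_map, PySem.List.length_pyRange_one] at this
      omega
    simp only [List.getElem_mapIdx, List.getElem_map, PySem.List.getElem_pyRange_one]
    rw [List.nil_append, pv_pp_filter s world_size j hpos hjs]
    norm_num
  · rw [if_neg hpos]
    rw [PySem.List.pyRange_one_eq_nil (by omega : s ≤ 0)]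
    simp

-- ===== VERDICT =====
theorem get_tp_pp_ranks_spec : Claim_equal_get_tp_pp_ranks := by
  intro world_size tp_size pp_size _ hpre
  unfold Spec_get_tp_pp_ranks get_tp_pp_ranks get_tp_pp_ranks_alt
  simp only
  exact Prod.ext (pv_tp_eq world_size tp_size hpre.1) (pv_pp_eq world_size pp_size)
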